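-- pv_equiv track=rewrite | github.com/criticalRobin/python | 8kyu/count_positives_sum_negatives.py | count_positives_sum_negatives
-- ===== SOURCE A (Python) =====
-- def count_positives_sum_negatives(arr):
--     counter = 0
--     negative_sum = 0
--
--     if len(arr) == 0:
--         return []
--
--     for num in arr:
--         if num > 0:
--             counter += 1
--         else:
--             negative_sum += num
--
--     return [counter, negative_sum]
-- ===== SOURCE B (Python) =====
-- def count_positives_sum_negatives(arr):
--     if len(arr) == 0:
--         return []
--     count = sum(1 for x in arr if x > 0)
--     negative_sum = sum(x for x in arr if x < 0)
--     return [count, negative_sum]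
-- ===== Notes on version B (the rewrite author's own statement) =====
-- stated objective: idiomatic
-- what changed: Replaces the single accumulator loop over both counters with two independent one-liner reductions (a count of positives and a sum over a filter of negatives), dropping the else-branch-with-zero trick.
import Mathlib
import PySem

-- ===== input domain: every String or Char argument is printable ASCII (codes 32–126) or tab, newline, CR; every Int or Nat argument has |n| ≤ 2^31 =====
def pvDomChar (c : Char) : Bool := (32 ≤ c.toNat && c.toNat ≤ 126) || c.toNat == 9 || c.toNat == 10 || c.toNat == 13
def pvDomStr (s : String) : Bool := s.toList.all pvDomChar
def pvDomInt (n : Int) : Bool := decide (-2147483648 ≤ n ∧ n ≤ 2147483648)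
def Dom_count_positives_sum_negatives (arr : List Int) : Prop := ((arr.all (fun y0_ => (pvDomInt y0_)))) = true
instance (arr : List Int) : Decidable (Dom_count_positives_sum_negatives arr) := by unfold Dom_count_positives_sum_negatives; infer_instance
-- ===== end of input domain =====

-- B computes the two outputs by two independent filtered reductions instead of A's single
-- accumulator loop with an else branch; idiomatic, not faster.

-- ===== PORT A =====
-- single pass: fold over arr carrying (counter, negative_sum)
def count_positives_sum_negatives (arr : List Int) : List Int :=
  if arr.length = 0 then []
  else
    let p := arr.foldl (fun (st : Int × Int) num =>
      if num > 0 then (st.1 + 1, st.2) else (st.1, st.2 + num)) (0, 0)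
    [p.1, p.2]

-- ===== PORT B =====
def count_positives_sum_negatives_alt (arr : List Int) : List Int :=
  if arr.length = 0 then []
  else
    let count : Int := ((arr.filter (fun x => x > 0)).map (fun _ => (1 : Int))).sum
    let negative_sum : Int := (arr.filter (fun x => x < 0)).sum
    [count, negative_sum]

-- ===== PRECONDITION & SPEC =====
def Spec_count_positives_sum_negatives (arr : List Int) (out : List Int) : Prop := out = count_positives_sum_negatives_alt arr
instance (arr : List Int) (out : List Int) : Decidable (Spec_count_positives_sum_negatives arr out) := by unfold Spec_count_positives_sum_negatives; infer_instance

-- ===== CLAIM (what is proved, stated in full; the proofs are below) =====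
def Claim_equal_count_positives_sum_negatives : Prop := ∀ (arr : List Int), Dom_count_positives_sum_negatives arr → Spec_count_positives_sum_negatives arr (count_positives_sum_negatives arr)

-- ===== LEMMAS AND PROOFS =====

theorem cpsn_fold (arr : List Int) (c s : Int) :
    arr.foldl (fun (st : Int × Int) num =>
      if num > 0 then (st.1 + 1, st.2) else (st.1, st.2 + num)) (c, s)
    = (c + ((arr.filter (fun x => x > 0)).map (fun _ => (1 : Int))).sum,
       s + (arr.filter (fun x => x < 0)).sum) := by
  induction arr generalizing c s with
  | nil => simp
  | cons h t ih =>
    by_cases hp : h > 0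
    · have hn : ¬ h < 0 := by omega
      simp [List.foldl, hp, hn, ih]
      ring
    · by_cases hn : h < 0
      · simp [List.foldl, hp, hn, ih]
        ring
      · have h0 : h = 0 := by omega
        simp [List.foldl, ih, h0]

-- ===== VERDICT (by name: the statement is the Claim_ definition above) =====
theorem count_positives_sum_negatives_spec : Claim_equal_count_positives_sum_negatives := by
  intro arr _
  unfold Spec_count_positives_sum_negatives count_positives_sum_negatives count_positives_sum_negatives_alt
  by_cases h : arr.length = 0
  · simp [h]
  · simp [h, cpsn_fold]
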